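-- pv_equiv track=rewrite | github.com/worldluk/university_labs_chm | Lab2/ЧМlab2.py | forward_differences
-- ===== SOURCE A (Python) =====
-- def forward_differences(y):
--     """Обчислення скінченних різниць (для факторіальних многочленів)"""
--     m = len(y) - 1
--     diffs = list(y)
--     result = [diffs[0]]
--     for order in range(1, m + 1):
--         diffs = [diffs[i + 1] - diffs[i] for i in range(len(diffs) - 1)]
--         result.append(diffs[0])
--     return result
-- ===== SOURCE B (Python) =====
-- def forward_differences(y):
--     """In-place backward-sweep computation of the leading finite differences."""
--     d = list(y)
--     n = len(d)
--     for k in range(1, n):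
--         for i in reversed(range(k, n)):
--             d[i] -= d[i - 1]
--     return d
-- ===== Notes on version B (the rewrite author's own statement) =====
-- stated objective: alternative
-- what changed: B replaces A's order-by-order rebuilding of fresh difference lists (storing each list's head) with a single mutable array updated in place by backward sweeps, returning the array itself.
-- outside the precondition, e.g. on forward_differences([]): A raises IndexError, B returns []
import Mathlib
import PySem

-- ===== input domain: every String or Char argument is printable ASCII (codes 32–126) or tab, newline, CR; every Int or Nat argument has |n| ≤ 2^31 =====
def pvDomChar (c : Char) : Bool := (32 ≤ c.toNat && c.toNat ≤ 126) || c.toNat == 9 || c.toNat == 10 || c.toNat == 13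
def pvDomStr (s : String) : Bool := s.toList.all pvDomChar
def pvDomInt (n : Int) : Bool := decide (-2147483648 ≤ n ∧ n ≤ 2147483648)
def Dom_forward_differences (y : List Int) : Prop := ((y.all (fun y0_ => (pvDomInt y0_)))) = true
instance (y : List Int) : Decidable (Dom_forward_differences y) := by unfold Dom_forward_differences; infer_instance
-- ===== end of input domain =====

-- B replaces A's order-by-order rebuilding of fresh difference lists with one array
-- updated in place by backward sweeps (objective: alternative).

-- ===== PORT A =====
-- A: m = len(y)-1; diffs = list(y); result = [diffs[0]]; for order in range(1, m+1):
--    diffs = [diffs[i+1]-diffs[i] for i in range(len(diffs)-1)]; result.append(diffs[0]); return result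
-- diffs[0] is always in range on Pre_ (y ≠ []), so pyGetD is exact there.
def forward_differences (y : List Int) : List Int :=
  let m : Int := (y.length : Int) - 1
  let diffs : List Int := y
  let result : List Int := [PySem.List.pyGetD diffs 0 0]
  ((PySem.List.pyRange 1 (m + 1) 1).foldl
      (fun (st : List Int × List Int) (_ : Int) =>
        let diffs' := (PySem.List.pyRange 0 ((st.2.length : Int) - 1) 1).map
          (fun i => PySem.List.pyGetD st.2 (i + 1) 0 - PySem.List.pyGetD st.2 i 0)
        (st.1 ++ [PySem.List.pyGetD diffs' 0 0], diffs'))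
      (result, diffs)).1

-- ===== PORT B =====
-- B: d = list(y); n = len(d); for k in range(1, n): for i in reversed(range(k, n)): d[i] -= d[i-1]; return d
-- every index i, i-1 touched is in range (1 ≤ k ≤ i ≤ n-1), so pyGetD/pySetD are exact.
def forward_differences_alt (y : List Int) : List Int :=
  let n : Int := (y.length : Int)
  (PySem.List.pyRange 1 n 1).foldl
    (fun d k =>
      ((PySem.List.pyRange k n 1).reverse).foldl
        (fun d i => PySem.List.pySetD d i (PySem.List.pyGetD d i 0 - PySem.List.pyGetD d (i - 1) 0)) d)
    y

-- ===== PRECONDITION & SPEC =====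
-- Pre_ excludes only the empty list, on which A raises IndexError (diffs[0]); B returns [] there.
def Pre_forward_differences (y : List Int) : Prop := y ≠ []
instance (y : List Int) : Decidable (Pre_forward_differences y) := by unfold Pre_forward_differences; infer_instance
def pvWitness_forward_differences : List Int := ([1, 3, 8])

def Spec_forward_differences (y : List Int) (out : List Int) : Prop := out = forward_differences_alt y
instance (y : List Int) (out : List Int) : Decidable (Spec_forward_differences y out) := by unfold Spec_forward_differences; infer_instance

-- ===== CLAIM (what is proved, stated in full; the proofs are below) =====
def Claim_equal_forward_differences : Prop := ∀ (y : List Int), Dom_forward_differences y → Pre_forward_differences y → Spec_forward_differences y (forward_differences y)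

-- ===== LEMMAS AND PROOFS =====

-- one difference step: dstep [y0, y1, ...] = [y1-y0, y2-y1, ...]
def dstep : List Int → List Int
  | a :: b :: t => (b - a) :: dstep (b :: t)
  | _ => []

lemma dstep_length (l : List Int) : (dstep l).length = l.length - 1 := by
  induction l with
  | nil => simp [dstep]
  | cons a t ih =>
    cases t with
    | nil => simp [dstep]
    | cons b t' => simp [dstep] at ih ⊢; omega

def tri : List Int → List Int
  | [] => []
  | a :: t => a :: tri (dstep (a :: t))
termination_by l => l.length
decreasing_by simp [dstep_length]

lemma dstep_of_short (l : List Int) (h : l.length ≤ 1) : dstep l = [] := by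
  match l, h with
  | [], _ => rfl
  | [a], _ => rfl

lemma aux1 (l : List Int) :
    (List.range (l.length - 1)).map (fun k => l.getD (k+1) 0 - l.getD k 0) = dstep l := by
  induction l with
  | nil => simp [dstep]
  | cons a t ih =>
    cases t with
    | nil => simp [dstep]
    | cons b t' =>
      simp only [List.length_cons, Nat.add_sub_cancel, List.range_succ_eq_map, List.map_cons,
        List.map_map, dstep]
      refine congrArg₂ List.cons (by simp) ?_
      rw [← ih]
      simp [Function.comp]

lemma comp_eq_dstep (l : List Int) :
    (PySem.List.pyRange 0 ((l.length : Int) - 1) 1).map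
      (fun i => PySem.List.pyGetD l (i + 1) 0 - PySem.List.pyGetD l i 0) = dstep l := by
  rw [PySem.List.pyRange_one, List.map_map]
  have h : ((l.length : Int) - 1 - 0).toNat = l.length - 1 := by omega
  rw [h, ← aux1 l]
  apply List.map_congr_left
  intro k hk
  simp only [Function.comp, zero_add]
  have : (k : Int) + 1 = ((k + 1 : Nat) : Int) := by push_cast; ring
  rw [this, PySem.List.pyGetD_natCast, PySem.List.pyGetD_natCast]

lemma lemA (t : Nat) : ∀ (a : Int) (acc diffs : List Int), diffs.length = t + 1 →
    ((PySem.List.pyRange a (a + (t : Int)) 1).foldl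
      (fun (st : List Int × List Int) (_ : Int) =>
        let diffs' := (PySem.List.pyRange 0 ((st.2.length : Int) - 1) 1).map
          (fun i => PySem.List.pyGetD st.2 (i + 1) 0 - PySem.List.pyGetD st.2 i 0)
        (st.1 ++ [PySem.List.pyGetD diffs' 0 0], diffs'))
      (acc, diffs)).1 = acc ++ tri (dstep diffs) := by
  induction t with
  | zero =>
    intro a acc diffs h
    rw [show a + ((0:Nat):Int) = a by push_cast; ring, PySem.List.pyRange_one_eq_nil (le_refl a)]
    simp [dstep_of_short diffs (by omega), tri]
  | succ t ih =>
    intro a acc diffs h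
    rw [PySem.List.pyRange_one_cons (by push_cast; omega), List.foldl_cons]
    simp only [comp_eq_dstep diffs]
    have hlen : (dstep diffs).length = t + 1 := by rw [dstep_length]; omega
    have : a + ((t+1:Nat):Int) = (a + 1) + ((t:Nat):Int) := by push_cast; ring
    rw [this, ih (a+1) _ _ hlen]
    obtain ⟨c, rest, hc⟩ : ∃ c rest, dstep diffs = c :: rest := by
      cases hd : dstep diffs with
      | nil => rw [hd] at hlen; simp at hlen
      | cons c rest => exact ⟨c, rest, rfl⟩
    rw [hc]
    simp [tri, PySem.List.pyGetD_zero_cons]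

lemma A_eq_tri (y : List Int) (h : y ≠ []) : forward_differences y = tri y := by
  obtain ⟨a, t, rfl⟩ := List.exists_cons_of_ne_nil h
  unfold forward_differences
  simp only
  rw [show ((a :: t).length : Int) - 1 + 1 = 1 + ((t.length : Nat) : Int) by simp; ring]
  rw [lemA t.length 1 _ (a :: t) (by simp)]
  rw [PySem.List.pyGetD_zero_cons]
  conv_rhs => rw [tri]
  simp

lemma sweep (t : Nat) : ∀ (d : List Int) (k : Nat), 1 ≤ k → k + t = d.length →
    ((PySem.List.pyRange (k : Int) ((d.length : Int)) 1).reverse).foldl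
      (fun d i => PySem.List.pySetD d i (PySem.List.pyGetD d i 0 - PySem.List.pyGetD d (i - 1) 0)) d
    = d.take k ++ dstep (d.drop (k - 1)) := by
  induction t with
  | zero =>
    intro d k hk1 hk
    rw [PySem.List.pyRange_one_eq_nil (by omega)]
    have hds : dstep (List.drop (k - 1) d) = [] :=
      dstep_of_short _ (by rw [List.length_drop]; omega)
    simp [List.take_of_length_le (by omega : d.length ≤ k), hds]
  | succ t ih =>
    intro d k hk1 hk
    have hklt : k < d.length := by omega
    rw [PySem.List.pyRange_one_cons (by exact_mod_cast hklt), List.reverse_cons, List.foldl_append]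
    rw [show (k : Int) + 1 = ((k + 1 : Nat) : Int) by push_cast; ring]
    rw [ih d (k + 1) (by omega) (by omega)]
    simp only [List.foldl_cons, List.foldl_nil, Nat.add_sub_cancel]
    have h1 : d.take (k+1) = d.take k ++ [d[k]] := List.take_succ_eq_append_getElem hklt
    have hk0 : k - 1 < d.length := by omega
    have hkk : k - 1 + 1 = k := by omega
    have h2 : d.drop (k-1) = d[k-1] :: d.drop k := by
      have := List.drop_eq_getElem_cons hk0 (l := d); rwa [hkk] at this
    have h3 : d.drop k = d[k] :: d.drop (k+1) := List.drop_eq_getElem_cons hklt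
    have hlentk : (d.take k).length = k := by simp; omega
    rw [h1, List.append_assoc]
    rw [show (k : Int) - 1 = ((k - 1 : Nat) : Int) by omega]
    rw [PySem.List.pySetD_natCast, PySem.List.pyGetD_natCast, PySem.List.pyGetD_natCast]
    have hDk : (d.take k ++ ([d[k]] ++ dstep (d.drop k))).getD k 0 = d[k] := by
      rw [List.getD_append_right _ _ _ _ hlentk.le]
      simp [hlentk]
    have hDk1 : (d.take k ++ ([d[k]] ++ dstep (d.drop k))).getD (k-1) 0 = d[k-1] := by
      rw [List.getD_append _ _ _ _ (by omega)]
      rw [List.getD_eq_getElem _ _ (by omega), List.getElem_take]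
    rw [hDk, hDk1, List.set_append_right _ _ hlentk.le, hlentk, Nat.sub_self]
    rw [h2, h3]
    simp [dstep]

lemma lemB (t : Nat) : ∀ (pref s : List Int), s.length = t + 1 →
    (PySem.List.pyRange ((pref.length + 1 : Nat) : Int) (((pref ++ s).length : Nat) : Int) 1).foldl
      (fun d k =>
        ((PySem.List.pyRange k (((pref ++ s).length : Nat) : Int) 1).reverse).foldl
          (fun d i => PySem.List.pySetD d i (PySem.List.pyGetD d i 0 - PySem.List.pyGetD d (i - 1) 0)) d)
      (pref ++ s)
    = pref ++ tri s := by
  induction t with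
  | zero =>
    intro pref s hs
    obtain ⟨s0, rfl⟩ : ∃ s0, s = [s0] := by
      match s, hs with
      | [s0], _ => exact ⟨s0, rfl⟩
    rw [PySem.List.pyRange_one_eq_nil (by simp)]
    simp [tri, dstep]
  | succ t ih =>
    intro pref s hs
    obtain ⟨s0, srest, rfl⟩ := List.exists_cons_of_ne_nil (by intro h; rw [h] at hs; simp at hs : s ≠ [])
    have hsr : srest.length = t + 1 := by simpa using hs
    rw [PySem.List.pyRange_one_cons (by push_cast; simp; omega), List.foldl_cons]
    rw [sweep (t + 1) (pref ++ s0 :: srest) (pref.length + 1) (by omega) (by simp; omega)]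
    simp only [Nat.add_sub_cancel]
    have hT : (pref ++ s0 :: srest).take (pref.length + 1) = pref ++ [s0] := by
      rw [show pref.length + 1 = (pref ++ [s0]).length by simp,
        show pref ++ s0 :: srest = (pref ++ [s0]) ++ srest by simp, List.take_left]
    have hD : (pref ++ s0 :: srest).drop pref.length = s0 :: srest := by simp
    rw [hT, hD]
    have hs' : (dstep (s0 :: srest)).length = t + 1 := by rw [dstep_length]; simp at hs ⊢; omega
    have hb : (((pref ++ s0 :: srest).length : Nat) : Int)
        = ((((pref ++ [s0]) ++ dstep (s0 :: srest)).length : Nat) : Int) := by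
      simp [dstep_length]
    have ha : ((pref.length + 1 : Nat) : Int) + 1 = (((pref ++ [s0]).length + 1 : Nat) : Int) := by
      push_cast; simp
    rw [hb, ha, ih (pref ++ [s0]) (dstep (s0 :: srest)) hs']
    conv_rhs => rw [tri]
    simp

lemma B_eq_tri (y : List Int) (h : y ≠ []) : forward_differences_alt y = tri y := by
  have hl : 1 ≤ y.length := List.length_pos_iff.mpr h
  have hb := lemB (y.length - 1) [] y (by omega)
  simp only [List.nil_append, List.length_nil, Nat.zero_add, Nat.cast_one] at hb
  unfold forward_differences_alt
  simpa using hb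

-- ===== VERDICT (by name: the statement is the Claim_ definition above) =====
theorem forward_differences_spec : Claim_equal_forward_differences := by
  intro y _ hpre
  unfold Spec_forward_differences
  rw [A_eq_tri y hpre, B_eq_tri y hpre]
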